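-- pv_equiv track=rewrite | github.com/PeARSearch/PeARS-federated | app/search/overlap_calculation.py | snippet_overlap
-- ===== SOURCE A (Python) =====
-- import string
--
-- def snippet_overlap(q, s):
--     '''Overlap between words in query and any part of snippet string'''
--     score = 0
--     q = "".join(l if l not in string.punctuation else ' ' for l in q.lower())
--     q_words = q.split()
--     for w in q_words:
--         if w in s:
--             score+=1
--     return score
-- ===== SOURCE B (Python) =====
-- import string
--
-- def snippet_overlap(q, s):
--     '''Overlap between words in query and any part of snippet string'''
--     separators = set(string.punctuation)
--     score = 0
--     word = []
--     for c in q.lower():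
--         if c in separators or c.isspace():
--             if word and ''.join(word) in s:
--                 score += 1
--             word = []
--         else:
--             word.append(c)
--     if word and ''.join(word) in s:
--         score += 1
--     return score
-- ===== Notes on version B (the rewrite author's own statement) =====
-- stated objective: alternative
-- what changed: B replaces A's build-normalized-string / str.split / second loop pipeline by a single streaming pass over q.lower() that accumulates each word and tests it against the snippet the moment a separator ends it, never materialising the normalized string or the word list.
import Mathlib
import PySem

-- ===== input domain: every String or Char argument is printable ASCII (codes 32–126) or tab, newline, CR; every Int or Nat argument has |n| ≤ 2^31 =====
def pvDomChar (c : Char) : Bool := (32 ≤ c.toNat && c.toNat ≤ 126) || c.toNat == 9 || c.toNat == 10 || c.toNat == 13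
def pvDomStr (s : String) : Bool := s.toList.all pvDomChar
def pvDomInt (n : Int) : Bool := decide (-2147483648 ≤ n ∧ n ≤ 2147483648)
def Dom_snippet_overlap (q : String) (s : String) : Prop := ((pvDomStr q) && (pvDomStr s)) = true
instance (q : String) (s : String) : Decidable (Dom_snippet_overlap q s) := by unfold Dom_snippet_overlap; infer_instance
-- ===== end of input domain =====

-- B streams over q.lower() once, scoring each word as a separator ends it, instead of A's
-- normalized-string / split / second-loop pipeline (alternative decomposition, same values).

-- string.punctuation (shared constant)
def pvPunct : List Char := "!\"#$%&'()*+,-./:;<=>?@[\\]^_`{|}~".toList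

-- ===== PORT A =====
def snippet_overlap (q : String) (s : String) : Int :=
  -- q = "".join(l if l not in string.punctuation else ' ' for l in q.lower())
  let q2 := PySem.Chars.join []
    ((PySem.Chars.lower q.toList).map
      (fun l => if PySem.Chars.isIn [l] pvPunct = false then [l] else [' ']))
  -- q_words = q.split()
  let qWords := PySem.Chars.split₀ q2
  -- for w in q_words: if w in s: score += 1
  qWords.foldl (fun score w => if PySem.Chars.isIn w s.toList then score + 1 else score) 0

-- ===== PORT B =====
-- c in separators or c.isspace()
def pvSep (c : Char) : Bool := PySem.Chars.isIn [c] pvPunct || PySem.Chars.isspace c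

-- the streaming loop of Source B: word is the word being accumulated, score the running count
def pvBLoop (s : List Char) : List Char → List Char → Int → Int
  | [], word, score =>
    if !word.isEmpty && PySem.Chars.isIn word s then score + 1 else score
  | c :: rest, word, score =>
    if pvSep c then
      pvBLoop s rest []
        (if !word.isEmpty && PySem.Chars.isIn word s then score + 1 else score)
    else pvBLoop s rest (word ++ [c]) score

def snippet_overlap_alt (q : String) (s : String) : Int :=
  pvBLoop s.toList (PySem.Chars.lower q.toList) [] 0

-- ===== PRECONDITION & SPEC =====
def Spec_snippet_overlap (q : String) (s : String) (out : Int) : Prop := out = snippet_overlap_alt q s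
instance (q : String) (s : String) (out : Int) : Decidable (Spec_snippet_overlap q s out) := by unfold Spec_snippet_overlap; infer_instance

-- ===== CLAIM (what is proved, stated in full; the proofs are below) =====
def Claim_equal_snippet_overlap : Prop := ∀ (q : String) (s : String), Dom_snippet_overlap q s → Spec_snippet_overlap q s (snippet_overlap q s)

-- ===== LEMMAS AND PROOFS =====

-- proof-side tokenizer: the word list B's loop implicitly walks through
def pvTokenize : List Char → List Char → List (List Char)
  | [], cur => if cur.isEmpty then [] else [cur]
  | c :: rest, cur =>
    if pvSep c then
      (if cur.isEmpty then pvTokenize rest [] else cur :: pvTokenize rest [])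
    else pvTokenize rest (cur ++ [c])

-- the replacement A applies to each character
def pvG (l : Char) : Char := if PySem.Chars.isIn [l] pvPunct = false then l else ' '

theorem pvG_isspace (c : Char) : PySem.Chars.isspace (pvG c) = pvSep c := by
  unfold pvG pvSep
  cases PySem.Chars.isIn [c] pvPunct
  · simp
  · simp
    decide

theorem pv_go_eq (cs cur acc) :
    PySem.Chars.split₀.go (cs.map pvG) cur.reverse acc = acc.reverse ++ pvTokenize cs cur := by
  induction cs generalizing cur acc with
  | nil =>
    by_cases h : cur = []
    · simp [PySem.Chars.split₀.go, pvTokenize, h]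
    · simp [PySem.Chars.split₀.go, pvTokenize, h]
  | cons c rest ih =>
    simp only [List.map_cons, PySem.Chars.split₀.go, pvG_isspace]
    cases hs : pvSep c
    · have hg : pvG c = c := by
        unfold pvG
        simp only [pvSep, Bool.or_eq_false_iff] at hs
        simp [hs.1]
      rw [hg]
      simpa [pvTokenize, hs, ← List.reverse_cons] using ih (cur ++ [c]) acc
    · cases h : cur.isEmpty
      · have := ih [] (cur :: acc)
        simp only [List.reverse_nil] at this
        simp [pvTokenize, hs, h, this, List.reverse_cons]
      · have := ih [] acc
        simp only [List.reverse_nil] at this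
        simp [pvTokenize, hs, h, this]

-- B's fused loop counts exactly the matching words of the tokenization
theorem pvBLoop_eq_countP (s : List Char) (cs cur : List Char) (score : Int) :
    pvBLoop s cs cur score
      = score + ((pvTokenize cs cur).countP (fun w => PySem.Chars.isIn w s) : Int) := by
  induction cs generalizing cur score with
  | nil =>
    cases h : cur.isEmpty <;> cases hm : PySem.Chars.isIn cur s <;>
      simp [pvBLoop, pvTokenize, h, hm]
  | cons c rest ih =>
    cases hs : pvSep c
    · simp only [pvBLoop, pvTokenize, hs, Bool.false_eq_true, if_false]
      exact ih (cur ++ [c]) score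
    · cases h : cur.isEmpty
      · rw [show pvBLoop s (c :: rest) cur score
            = pvBLoop s rest []
                (if !cur.isEmpty && PySem.Chars.isIn cur s then score + 1 else score) by
              simp [pvBLoop, hs],
           ih]
        cases hm : PySem.Chars.isIn cur s <;>
          simp [pvTokenize, hs, h, hm]; ring
      · rw [show pvBLoop s (c :: rest) cur score
            = pvBLoop s rest []
                (if !cur.isEmpty && PySem.Chars.isIn cur s then score + 1 else score) by
              simp [pvBLoop, hs],
           ih]
        simp [pvTokenize, hs, h]

-- ===== VERDICT (by name: the statement is the Claim_ definition above) =====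
theorem snippet_overlap_spec : Claim_equal_snippet_overlap := by
  intro q s _
  unfold Spec_snippet_overlap snippet_overlap snippet_overlap_alt
  dsimp only
  -- A's mapped join is pvG applied pointwise
  have hjoin : (fun l => if PySem.Chars.isIn [l] pvPunct = false then [l] else [' '])
      = fun l => [pvG l] := by
    funext l; unfold pvG; split <;> rfl
  rw [hjoin]
  have hmap : (PySem.Chars.lower q.toList).map (fun l => [pvG l])
      = ((PySem.Chars.lower q.toList).map pvG).map (fun c => [c]) := by
    simp [List.map_map, Function.comp]
  rw [hmap, PySem.Chars.join_nil_singletons]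
  -- the split equals the tokenization B's loop walks through
  have hsplit : PySem.Chars.split₀ (((PySem.Chars.lower q.toList)).map pvG)
      = pvTokenize (PySem.Chars.lower q.toList) [] := by
    have := pv_go_eq (PySem.Chars.lower q.toList) [] []
    simpa [PySem.Chars.split₀] using this
  rw [hsplit, PySem.List.foldl_if_add_one, pvBLoop_eq_countP]
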